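-- pv_equiv track=rewrite | github.com/tabenmalik/Project-Euler | pe/euler_problems/euler_026.py | long_division
-- ===== SOURCE A (Python) =====
-- def long_division(numerator, denominator):
--     whole = int(numerator // denominator)
--
--     decimals = []
--     remainders = set()
--     dividend = numerator % denominator * 10
--     while True:
--         if dividend == 0:
--             break
--
--         qoutient = int(dividend // denominator)
--         remainder = dividend % denominator
--
--         if (qoutient, remainder) in remainders:
--             break
--
--         remainders.add((qoutient, remainder))
--         decimals.append(qoutient)
--         dividend = remainder * 10
--
--     repeating_decimals = []
--     if dividend != 0:
--         remainders = set()
--         while True: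
--             if dividend == 0:
--                 break
--
--             qoutient = int(dividend // denominator)
--             remainder = dividend % denominator
--
--             if (qoutient, remainder) in remainders:
--                 break
--
--             remainders.add((qoutient, remainder))
--             repeating_decimals.append(qoutient)
--             dividend = remainder * 10
--
--     if len(repeating_decimals) > 0:
--         decimals = decimals[:-len(repeating_decimals)]
--
--     return whole, decimals, repeating_decimals
-- ===== SOURCE B (Python) =====
-- def long_division(numerator, denominator):
--     whole = numerator // denominator
--     rem = numerator % denominator
--     digits = []
--     positions = {}
--     while rem != 0 and rem not in positions:
--         positions[rem] = len(digits)
--         rem10 = rem * 10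
--         digits.append(rem10 // denominator)
--         rem = rem10 % denominator
--     if rem == 0:
--         return whole, digits, []
--     idx = positions[rem]
--     return whole, digits[:idx], digits[idx:]
-- ===== Notes on version B (the rewrite author's own statement) =====
-- stated objective: simpler
-- what changed: B does one long-division loop that records each remainder's first-seen position in a dict and splits the digit list at that index, instead of A's two separate (quotient,remainder)-set loops plus a negative-slice truncation of the decimals.
import Mathlib
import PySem

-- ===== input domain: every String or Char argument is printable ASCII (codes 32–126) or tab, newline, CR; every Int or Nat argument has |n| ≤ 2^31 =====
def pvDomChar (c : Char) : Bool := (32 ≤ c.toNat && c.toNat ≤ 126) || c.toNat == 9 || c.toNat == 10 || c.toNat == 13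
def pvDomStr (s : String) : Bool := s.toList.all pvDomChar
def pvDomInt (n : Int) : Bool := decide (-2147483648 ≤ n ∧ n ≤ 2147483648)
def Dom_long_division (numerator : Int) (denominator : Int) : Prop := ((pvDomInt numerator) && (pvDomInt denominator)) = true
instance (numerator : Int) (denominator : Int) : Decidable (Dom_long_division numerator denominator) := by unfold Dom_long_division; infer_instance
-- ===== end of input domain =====

-- B replaces A's two (quotient,remainder)-set loops and negative-slice truncation by ONE
-- long-division loop recording each remainder's first-seen index in a dict (objective: simpler).

-- ===== PORT A =====
-- A's 'while True' loop; the fuel |den|+1 only bounds the iteration count (the loop breaks as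
-- soon as a (quotient, remainder) pair repeats, and there are at most |den| distinct pairs).
def pvAStep (den : Int) : Nat → List Int → PySem.Set (Int × Int) → Int → List Int × Int
  | 0, decs, _, dividend => (decs, dividend)
  | fuel+1, decs, seen, dividend =>
    if dividend = 0 then (decs, dividend)
    else
      let q := PySem.Int.floordiv dividend den
      let r := PySem.Int.mod dividend den
      if PySem.Set.contains seen (q, r) then (decs, dividend)
      else pvAStep den fuel (decs ++ [q]) (PySem.Set.add seen (q, r)) (r * 10)

def long_division (numerator : Int) (denominator : Int) : Int × List Int × List Int :=
  let whole := PySem.Int.floordiv numerator denominator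
  let p := pvAStep denominator (denominator.natAbs + 1) [] PySem.Set.empty
             (PySem.Int.mod numerator denominator * 10)
  let decimals := p.1
  let dividend := p.2
  let repeating :=
    if dividend ≠ 0 then
      (pvAStep denominator (denominator.natAbs + 1) [] PySem.Set.empty dividend).1
    else []
  let decimals' :=
    if 0 < repeating.length then
      PySem.List.slice decimals none (some (-(repeating.length : Int)))
    else decimals
  (whole, decimals', repeating)

-- ===== PORT B =====
-- Source B's 'while rem != 0 and rem not in positions' loop; same fuel bound remark as above.
def pvBStep (den : Int) : Nat → List Int → PySem.Dict Int Int → Int → List Int × PySem.Dict Int Int × Int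
  | 0, digits, pos, rem => (digits, pos, rem)
  | fuel+1, digits, pos, rem =>
    if rem ≠ 0 ∧ ¬ (PySem.Dict.contains pos rem = true) then
      let pos' := PySem.Dict.insert pos rem (digits.length : Int)
      let rem10 := rem * 10
      pvBStep den fuel (digits ++ [PySem.Int.floordiv rem10 den]) pos' (PySem.Int.mod rem10 den)
    else (digits, pos, rem)

def long_division_alt (numerator : Int) (denominator : Int) : Int × List Int × List Int :=
  let whole := PySem.Int.floordiv numerator denominator
  let t := pvBStep denominator (denominator.natAbs + 1) [] PySem.Dict.empty
             (PySem.Int.mod numerator denominator)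
  let digits := t.1
  let pos := t.2.1
  let rem := t.2.2
  if rem = 0 then (whole, digits, [])
  else
    -- Python 'positions[rem]': rem is always a key here (the loop exits only on rem == 0 or a seen rem)
    let idx := PySem.Dict.getD pos rem 0
    (whole, PySem.List.slice digits none (some idx), PySem.List.slice digits (some idx) none)

-- ===== PRECONDITION & SPEC =====
-- Pre_ excludes only denominator = 0, on which the Python A raises ZeroDivisionError.
def Pre_long_division (numerator : Int) (denominator : Int) : Prop := denominator ≠ 0
instance (numerator : Int) (denominator : Int) : Decidable (Pre_long_division numerator denominator) := by unfold Pre_long_division; infer_instance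

def pvWitness_long_division : Int × Int := (1, 7)

def Spec_long_division (numerator : Int) (denominator : Int) (out : Int × List Int × List Int) : Prop := out = long_division_alt numerator denominator
instance (numerator : Int) (denominator : Int) (out : Int × List Int × List Int) : Decidable (Spec_long_division numerator denominator out) := by unfold Spec_long_division; infer_instance

-- ===== CLAIM (what is proved, stated in full; the proofs are below) =====
def Claim_equal_long_division : Prop := ∀ (numerator : Int) (denominator : Int), Dom_long_division numerator denominator → Pre_long_division numerator denominator → Spec_long_division numerator denominator (long_division numerator denominator)

-- ===== LEMMAS AND PROOFS =====

-- Canonical remainder trace both loops follow: rem ↦ (rem*10) % den, emitting digit (rem*10) // den.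
def pvStep (den r : Int) : Int := PySem.Int.mod (r * 10) den
def pvDig (den r : Int) : Int := PySem.Int.floordiv (r * 10) den

-- visited remainders (in order) and the remainder at which the walk stops
def pvRun (den : Int) : Nat → List Int → Int → List Int × Int
  | 0, _, r => ([], r)
  | fuel+1, S, r =>
    if r = 0 ∨ r ∈ S then ([], r)
    else
      let p := pvRun den fuel (S ++ [r]) (pvStep den r)
      (r :: p.1, p.2)

def pvIdxOf : List Int → Int → Option Nat
  | [], _ => none
  | y :: S, x => if x = y then some 0 else (pvIdxOf S x).map (· + 1)

def pvIsRem (den x : Int) : Prop := (0 ≤ x ∧ x < den) ∨ (den < x ∧ x ≤ 0)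

lemma pvIdxOf_isSome : ∀ (S : List Int) (x : Int), (pvIdxOf S x).isSome = true ↔ x ∈ S
  | [], x => by simp [pvIdxOf]
  | y :: S, x => by
    by_cases h : x = y <;> simp [pvIdxOf, h, ← pvIdxOf_isSome S x]

lemma pvIdxOf_append_singleton : ∀ (S : List Int) (r : Int), r ∉ S → ∀ (x : Int),
    pvIdxOf (S ++ [r]) x = if x = r then some S.length else pvIdxOf S x
  | [], r, _, x => by simp [pvIdxOf]
  | y :: S, r, h, x => by
    have hry : r ≠ y := by simp only [List.mem_cons, not_or] at h; exact h.1
    have hrS : r ∉ S := by simp only [List.mem_cons, not_or] at h; exact h.2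
    have hIH := pvIdxOf_append_singleton S r hrS x
    simp only [List.cons_append, pvIdxOf, hIH]
    by_cases hxy : x = y
    · have hxr : ¬ x = r := fun hh => hry (hxy ▸ hh.symm)
      simp [hxy, Ne.symm hry]
    · by_cases hxr : x = r <;> simp [hxy, hxr, hry]

lemma pvIdxOf_spec : ∀ (S : List Int) (x : Int) (n : Nat), pvIdxOf S x = some n →
    (S.drop n).head? = some x
  | [], x, n => by simp [pvIdxOf]
  | y :: S, x, n => by
    by_cases h : x = y
    · subst h; simp [pvIdxOf]; rintro rfl; rfl
    · simp only [pvIdxOf, if_neg h, Option.map_eq_some_iff]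
      rintro ⟨m, hm, rfl⟩
      simpa using pvIdxOf_spec S x m hm

lemma pvRemBound (den : Int) (hden : den ≠ 0) (S : List Int) (hnd : S.Nodup)
    (h : ∀ x ∈ S, pvIsRem den x ∧ x ≠ 0) : S.length + 1 ≤ den.natAbs := by
  have hsub : S.toFinset ⊆ Finset.Ico (min 1 (den + 1)) (max 0 den) := by
    intro x hx
    rcases h x (List.mem_toFinset.mp hx) with ⟨hr, hx0⟩
    rcases hr with ⟨h1, h2⟩ | ⟨h1, h2⟩ <;> simp [Finset.mem_Ico] <;> omega
  have hcard := Finset.card_le_card hsub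
  rw [List.toFinset_card_of_nodup hnd, Int.card_Ico] at hcard
  omega

lemma pvASim (den : Int) : ∀ (f : Nat) (S decs : List Int) (seen : PySem.Set (Int × Int)) (r : Int),
    (∀ x : Int, ((pvDig den x, pvStep den x) ∈ seen) ↔ x ∈ S) →
    pvAStep den f decs seen (r * 10)
      = (decs ++ (pvRun den f S r).1.map (pvDig den), (pvRun den f S r).2 * 10)
  | 0, S, decs, seen, r, _ => by simp [pvAStep, pvRun]
  | f+1, S, decs, seen, r, hinv => by
    by_cases hr0 : r = 0
    · subst hr0; simp [pvAStep, pvRun]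
    · have hd0 : ¬ (r * 10 = 0) := by omega
      have hQ : PySem.Int.floordiv (r * 10) den = pvDig den r := rfl
      have hR : PySem.Int.mod (r * 10) den = pvStep den r := rfl
      by_cases hmem : r ∈ S
      · have hc : (pvDig den r, pvStep den r) ∈ seen := (hinv r).mpr hmem
        simp [pvAStep, pvRun, hd0, hr0, hmem, hQ, hR, hc]
      · have hc : (pvDig den r, pvStep den r) ∉ seen := fun h => hmem ((hinv r).mp h)
        have hinv' : ∀ x : Int, ((pvDig den x, pvStep den x) ∈ PySem.Set.add seen (pvDig den r, pvStep den r)) ↔ x ∈ S ++ [r] := by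
          intro x
          rw [PySem.Set.mem_add]
          constructor
          · rintro (hx | hx)
            · exact List.mem_append_left _ ((hinv x).mp hx)
            · have hx1 : pvDig den x = pvDig den r := congrArg Prod.fst hx
              have hx2 : pvStep den x = pvStep den r := congrArg Prod.snd hx
              have e1 := PySem.Int.floordiv_mul_add_mod (x * 10) den
              have e2 := PySem.Int.floordiv_mul_add_mod (r * 10) den
              simp only [pvDig, pvStep] at hx1 hx2
              rw [hx1, hx2] at e1
              have : x = r := by omega
              simp [this]
          · intro hx
            rcases List.mem_append.mp hx with hx | hx
            · exact Or.inl ((hinv x).mpr hx)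
            · simp only [List.mem_singleton] at hx
              exact Or.inr (by rw [hx])
        have hIH := pvASim den f (S ++ [r]) (decs ++ [pvDig den r])
          (PySem.Set.add seen (pvDig den r, pvStep den r)) (pvStep den r) hinv'
        have hcb : PySem.Set.contains seen (pvDig den r, pvStep den r) = false := by
          rw [Bool.eq_false_iff]
          intro h
          exact hc ((PySem.Set.contains_iff _ _).mp h)
        simp only [pvAStep, pvRun, if_neg hd0, hQ, hR, hcb, Bool.false_eq_true, if_false,
          if_neg (by simp [hr0, hmem] : ¬ (r = 0 ∨ r ∈ S))]
        rw [hIH]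
        simp

lemma pvBSim (den : Int) : ∀ (f : Nat) (S digits : List Int) (pos : PySem.Dict Int Int) (r : Int) (base : Nat),
    digits.length = base + S.length →
    (∀ x : Int, PySem.Dict.get? pos x = (pvIdxOf S x).map (fun n : Nat => ((base + n : Nat) : Int))) →
    (pvBStep den f digits pos r).1 = digits ++ (pvRun den f S r).1.map (pvDig den)
    ∧ (pvBStep den f digits pos r).2.2 = (pvRun den f S r).2
    ∧ (∀ x : Int, PySem.Dict.get? (pvBStep den f digits pos r).2.1 x
         = (pvIdxOf (S ++ (pvRun den f S r).1) x).map (fun n : Nat => ((base + n : Nat) : Int)))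
  | 0, S, digits, pos, r, base, _, hpos => by
    refine ⟨by simp [pvBStep, pvRun], by simp [pvBStep, pvRun], ?_⟩
    intro x
    simp [pvBStep, pvRun, hpos x]
  | f+1, S, digits, pos, r, base, hlen, hpos => by
    have hcontains : PySem.Dict.contains pos r = (pvIdxOf S r).isSome := by
      rw [PySem.Dict.contains_eq_isSome_get?, hpos r, Option.isSome_map]
    by_cases hstop : r = 0 ∨ r ∈ S
    · have hcond : ¬ (r ≠ 0 ∧ ¬ (PySem.Dict.contains pos r = true)) := by
        rcases hstop with h0 | hm
        · simp [h0]
        · simp [hcontains, (pvIdxOf_isSome S r).mpr hm]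
      refine ⟨?_, ?_, ?_⟩ <;>
        simp only [pvBStep, pvRun, if_neg hcond, if_pos hstop]
      · simp
      · intro x; simpa using hpos x
    · obtain ⟨hr0, hmem⟩ := not_or.mp hstop
      have hcond : r ≠ 0 ∧ ¬ (PySem.Dict.contains pos r = true) := by
        refine ⟨hr0, ?_⟩
        simp [hcontains, Option.isSome_iff_exists]
        intro n h
        exact hmem ((pvIdxOf_isSome S r).mp (by simp [h]))
      have hlen' : (digits ++ [PySem.Int.floordiv (r * 10) den]).length = base + (S ++ [r]).length := by
        simp [hlen]; omega
      have hpos' : ∀ x : Int, PySem.Dict.get? (PySem.Dict.insert pos r (digits.length : Int)) x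
          = (pvIdxOf (S ++ [r]) x).map (fun n : Nat => ((base + n : Nat) : Int)) := by
        intro x
        rw [PySem.Dict.get?_insert, pvIdxOf_append_singleton S r hmem x]
        by_cases hxr : x = r
        · simp [hxr, hlen]
        · simp [hxr, hpos x]
      have hIH := pvBSim den f (S ++ [r]) (digits ++ [PySem.Int.floordiv (r * 10) den])
        (PySem.Dict.insert pos r (digits.length : Int)) (PySem.Int.mod (r * 10) den) base hlen' hpos'
      have hrun : pvRun den (f+1) S r = (r :: (pvRun den f (S ++ [r]) (pvStep den r)).1, (pvRun den f (S ++ [r]) (pvStep den r)).2) := by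
        simp [pvRun, hr0, hmem]
      have hstepeq : PySem.Int.mod (r * 10) den = pvStep den r := rfl
      have hbstep : pvBStep den (f+1) digits pos r
          = pvBStep den f (digits ++ [PySem.Int.floordiv (r * 10) den])
              (PySem.Dict.insert pos r (digits.length : Int)) (PySem.Int.mod (r * 10) den) := by
        simp only [pvBStep, if_pos hcond]
      rw [hbstep, hrun]
      refine ⟨?_, ?_, ?_⟩
      · rw [hIH.1, hstepeq]
        simp [pvDig]
      · rw [hIH.2.1, hstepeq]
      · intro x
        rw [hIH.2.2 x, hstepeq]
        simp

lemma pvRunProps (den : Int) (hden : den ≠ 0) : ∀ (f : Nat) (S : List Int) (r : Int),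
    pvIsRem den r →
    (pvRun den f S r).1.Nodup
    ∧ (∀ x ∈ (pvRun den f S r).1, x ∉ S ∧ x ≠ 0 ∧ pvIsRem den x)
    ∧ List.IsChain (fun a b => b = pvStep den a) ((pvRun den f S r).1 ++ [(pvRun den f S r).2])
    ∧ ((pvRun den f S r).1 ++ [(pvRun den f S r).2]).head? = some r
  | 0, S, r, _ => by simp [pvRun]
  | f+1, S, r, hr => by
    by_cases hstop : r = 0 ∨ r ∈ S
    · simp [pvRun, hstop]
    · obtain ⟨hr0, hmem⟩ := not_or.mp hstop
      have hstep : pvIsRem den (pvStep den r) := by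
        rcases lt_or_gt_of_ne hden with hneg | hpos
        · exact Or.inr ⟨(PySem.Int.mod_neg_bounds (r * 10) hneg).1, (PySem.Int.mod_neg_bounds (r * 10) hneg).2⟩
        · exact Or.inl ⟨PySem.Int.mod_nonneg (r * 10) hpos, PySem.Int.mod_lt (r * 10) hpos⟩
      have hIH := pvRunProps den hden f (S ++ [r]) (pvStep den r) hstep
      obtain ⟨hnd, hmem', hchain, hhead⟩ := hIH
      have hrun : pvRun den (f+1) S r = (r :: (pvRun den f (S ++ [r]) (pvStep den r)).1, (pvRun den f (S ++ [r]) (pvStep den r)).2) := by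
        simp [pvRun, hr0, hmem]
      rw [hrun]
      refine ⟨?_, ?_, ?_, ?_⟩
      · exact List.nodup_cons.mpr ⟨fun hx => ((hmem' r hx).1 (by simp)), hnd⟩
      · intro x hx
        rcases List.mem_cons.mp hx with rfl | hx
        · exact ⟨hmem, hr0, hr⟩
        · have := hmem' x hx
          exact ⟨fun hxS => this.1 (List.mem_append_left _ hxS), this.2.1, this.2.2⟩
      · simp only [List.cons_append]
        exact List.isChain_cons.mpr ⟨by intro b hb; rw [hhead] at hb; simpa using hb.symm, hchain⟩
      · simp

lemma pvRunStop (den : Int) (hden : den ≠ 0) : ∀ (f : Nat) (S : List Int) (r : Int),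
    pvIsRem den r → S.Nodup → (∀ x ∈ S, pvIsRem den x ∧ x ≠ 0) →
    den.natAbs ≤ f + S.length →
    ((pvRun den f S r).2 = 0 ∨ (pvRun den f S r).2 ∈ S ++ (pvRun den f S r).1)
  | 0, S, r, hr, hnd, hS, hf => by
    exact absurd (pvRemBound den hden S hnd hS) (by omega)
  | f+1, S, r, hr, hnd, hS, hf => by
    by_cases hstop : r = 0 ∨ r ∈ S
    · rcases hstop with h0 | hm
      · simp [pvRun, h0]
      · right
        simp [pvRun, hm]
    · obtain ⟨hr0, hmem⟩ := not_or.mp hstop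
      have hstep : pvIsRem den (pvStep den r) := by
        rcases lt_or_gt_of_ne hden with hneg | hpos
        · exact Or.inr ⟨(PySem.Int.mod_neg_bounds (r * 10) hneg).1, (PySem.Int.mod_neg_bounds (r * 10) hneg).2⟩
        · exact Or.inl ⟨PySem.Int.mod_nonneg (r * 10) hpos, PySem.Int.mod_lt (r * 10) hpos⟩
      have hnd' : (S ++ [r]).Nodup := by
        simp [List.nodup_append, hnd]
        exact fun a a_1 => ne_of_mem_of_not_mem a_1 hmem
      have hS' : ∀ x ∈ S ++ [r], pvIsRem den x ∧ x ≠ 0 := by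
        intro x hx
        rcases List.mem_append.mp hx with hx | hx
        · exact hS x hx
        · simp only [List.mem_singleton] at hx
          subst hx
          exact ⟨hr, hr0⟩
      have hIH := pvRunStop den hden f (S ++ [r]) (pvStep den r) hstep hnd' hS' (by simp; omega)
      have hrun : pvRun den (f+1) S r = (r :: (pvRun den f (S ++ [r]) (pvStep den r)).1, (pvRun den f (S ++ [r]) (pvStep den r)).2) := by
        simp [pvRun, hr0, hmem]
      rw [hrun]
      rcases hIH with h0 | hm
      · exact Or.inl h0
      · right
        simp only [List.mem_append, List.mem_cons] at hm ⊢
        tauto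

lemma pvRunCycle (den : Int) : ∀ (Q : List Int) (f : Nat) (S : List Int) (r rb : Int),
    Q.length + 1 ≤ f → Q.Nodup → (∀ x ∈ Q, x ≠ 0 ∧ x ∉ S) →
    List.IsChain (fun a b => b = pvStep den a) (Q ++ [rb]) →
    Q.head? = some r →
    rb ∈ S ++ Q →
    pvRun den f S r = (Q, rb)
  | [], f, S, r, rb, hf, hnd, hQ, hchain, hhead, hrb => by simp at hhead
  | q :: Q', f, S, r, rb, hf, hnd, hQ, hchain, hhead, hrb => by
    have hrq : q = r := by simpa using hhead
    subst hrq
    obtain ⟨f', rfl⟩ : ∃ f'', f = f'' + 1 := ⟨f - 1, by simp at hf; omega⟩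
    have hq0 : q ≠ 0 := (hQ q (by simp)).1
    have hqS : q ∉ S := (hQ q (by simp)).2
    have hch := List.isChain_cons.mp (by simpa using hchain)
    have hnotstop : ¬ (q = 0 ∨ q ∈ S) := by simp [hq0, hqS]
    cases Q' with
    | nil =>
      have hrbstep : pvStep den q = rb := by
        have := hch.1 rb (by simp)
        exact this.symm
      obtain ⟨f'', rfl⟩ : ∃ f''', f' = f''' + 1 := ⟨f' - 1, by simp at hf; omega⟩
      have hrbmem : rb = 0 ∨ rb ∈ S ++ [q] := Or.inr hrb
      show pvRun den (f''+1+1) S q = ([q], rb)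
      simp only [pvRun, if_neg hnotstop, hrbstep, if_pos hrbmem]
    | cons q' Q'' =>
      have hq' : q' = pvStep den q := hch.1 q' (by simp)
      have hndtail := (List.nodup_cons.mp hnd)
      have hIH := pvRunCycle den (q' :: Q'') f' (S ++ [q]) q' rb
        (by simp at hf ⊢; omega)
        hndtail.2
        (by
          intro x hx
          refine ⟨(hQ x (List.mem_cons_of_mem _ hx)).1, ?_⟩
          simp only [List.mem_append, List.mem_singleton, not_or]
          exact ⟨(hQ x (List.mem_cons_of_mem _ hx)).2, fun hh => hndtail.1 (hh ▸ hx)⟩)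
        (by simpa using hch.2)
        (by simp)
        (by
          simp only [List.mem_append, List.mem_cons] at hrb ⊢
          tauto)
      show pvRun den (f'+1) S q = (q :: q' :: Q'', rb)
      simp only [pvRun, if_neg hnotstop, ← hq', hIH]

lemma pvModRem (den a : Int) (hden : den ≠ 0) : pvIsRem den (PySem.Int.mod a den) := by
  rcases lt_or_gt_of_ne hden with hneg | hpos
  · exact Or.inr ⟨(PySem.Int.mod_neg_bounds a hneg).1, (PySem.Int.mod_neg_bounds a hneg).2⟩
  · exact Or.inl ⟨PySem.Int.mod_nonneg a hpos, PySem.Int.mod_lt a hpos⟩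

-- ===== VERDICT (by name: the statement is the Claim_ definition above) =====
theorem long_division_spec : Claim_equal_long_division := by
  intro num den _ hpre
  have hden : den ≠ 0 := hpre
  unfold Spec_long_division
  have hA := pvASim den (den.natAbs + 1) [] [] PySem.Set.empty (PySem.Int.mod num den)
    (by intro x; simp [PySem.Set.empty])
  have hB := pvBSim den (den.natAbs + 1) [] [] PySem.Dict.empty (PySem.Int.mod num den) 0
    (by simp) (by intro x; simp [PySem.Dict.get?_empty, pvIdxOf])
  have hr0rem : pvIsRem den (PySem.Int.mod num den) := pvModRem den num hden
  obtain ⟨hndV, hmemV, hchain, hhead⟩ :=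
    pvRunProps den hden (den.natAbs + 1) [] (PySem.Int.mod num den) hr0rem
  have hstop := pvRunStop den hden (den.natAbs + 1) [] (PySem.Int.mod num den) hr0rem
    (by simp) (by simp) (by simp)
  have hVbound := pvRemBound den hden _ hndV
    (fun x hx => ⟨(hmemV x hx).2.2, (hmemV x hx).2.1⟩)
  simp only [long_division, long_division_alt]
  rw [hA, hB.1, hB.2.1]
  by_cases hrb0 : (pvRun den (den.natAbs + 1) [] (PySem.Int.mod num den)).2 = 0
  · simp [hrb0]
  · have hrbV : (pvRun den (den.natAbs + 1) [] (PySem.Int.mod num den)).2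
        ∈ (pvRun den (den.natAbs + 1) [] (PySem.Int.mod num den)).1 := by
      rcases hstop with h | h
      · exact absurd h hrb0
      · simpa using h
    obtain ⟨idx, hidx⟩ := Option.isSome_iff_exists.mp ((pvIdxOf_isSome _ _).mpr hrbV)
    have hdrophead := pvIdxOf_spec _ _ idx hidx
    have hidxlt : idx < (pvRun den (den.natAbs + 1) [] (PySem.Int.mod num den)).1.length := by
      by_contra h
      rw [List.drop_eq_nil_of_le (by omega)] at hdrophead
      simp at hdrophead
    -- the cycle: the second A-loop retraces exactly the suffix of the visited remainders
    have hcyc := pvRunCycle den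
      ((pvRun den (den.natAbs + 1) [] (PySem.Int.mod num den)).1.drop idx)
      (den.natAbs + 1) []
      ((pvRun den (den.natAbs + 1) [] (PySem.Int.mod num den)).2)
      ((pvRun den (den.natAbs + 1) [] (PySem.Int.mod num den)).2)
      (by simp [List.length_drop]; omega)
      (List.Sublist.nodup (List.drop_sublist _ _) hndV)
      (by
        intro x hx
        have := hmemV x (List.mem_of_mem_drop hx)
        exact ⟨this.2.1, by simp⟩)
      (by
        refine List.IsChain.suffix hchain ?_
        rw [← List.drop_append_of_le_length (by omega)]
        exact List.drop_suffix _ _)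
      hdrophead
      (by
        simp only [List.nil_append]
        exact List.mem_of_mem_head? (by rw [hdrophead]; simp))
    have hA2 := pvASim den (den.natAbs + 1) [] [] PySem.Set.empty
      ((pvRun den (den.natAbs + 1) [] (PySem.Int.mod num den)).2)
      (by intro x; simp [PySem.Set.empty])
    rw [hcyc] at hA2
    have hgetD : PySem.Dict.getD (pvBStep den (den.natAbs + 1) [] PySem.Dict.empty
        (PySem.Int.mod num den)).2.1 ((pvRun den (den.natAbs + 1) [] (PySem.Int.mod num den)).2) 0
        = ((idx : Nat) : Int) := by
      rw [PySem.Dict.getD_eq_get?_getD, hB.2.2]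
      simp [hidx]
    rw [hgetD]
    set V := (pvRun den (den.natAbs + 1) [] (PySem.Int.mod num den)).1 with hVdef
    set rb := (pvRun den (den.natAbs + 1) [] (PySem.Int.mod num den)).2 with hrbdef
    dsimp only at hA2 ⊢
    simp only [List.nil_append] at hA2 ⊢
    rw [hA2]
    have h10 : rb * 10 ≠ 0 := by intro h; apply hrb0; omega
    have hpos : 0 < (List.map (pvDig den) (List.drop idx V)).length := by
      simp only [List.length_map, List.length_drop]; omega
    rw [if_pos h10, if_pos hpos, if_neg hrb0]
    rw [PySem.List.slice_to_neg_natCast (List.map (pvDig den) V)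
      ((List.map (pvDig den) (List.drop idx V)).length) hpos]
    rw [PySem.List.slice_to_natCast, PySem.List.slice_from_natCast]
    have htake : (List.map (pvDig den) V).length - (List.map (pvDig den) (List.drop idx V)).length = idx := by
      simp only [List.length_map, List.length_drop]; omega
    rw [htake, List.map_drop]
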